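-- pv_equiv track=rewrite | github.com/MolfarUA/CodeWars_Solutions | 7 kyu/Pair Zeros/solution.py | pair_zeros
-- ===== SOURCE A (Python) =====
-- def pair_zeros(arr):
--     # As asked make a copy and not going to change initial array
--     zeros = arr.copy()
--
--     stack = False
--     offset = 0
--
--     # Fins first zero and remember it
--     for i,d in enumerate(arr):
--         if d == 0 and not stack:
--             stack = True
--             pass
--         # When find second zero delete it
--         # Offset because with each delete we shortened array
--         elif d == 0 and stack:
--             zeros.pop(i - offset)
--             stack = False
--             offset += 1
--
--     return zeros
-- ===== SOURCE B (Python) =====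
-- def pair_zeros(arr):
--     zero_indices = [i for i, x in enumerate(arr) if x == 0]
--     drop = {i for n, i in enumerate(zero_indices) if n % 2 == 1}
--     return [x for i, x in enumerate(arr) if i not in drop]
-- ===== Notes on version B (the rewrite author's own statement) =====
-- stated objective: alternative
-- what changed: Replaces A's single stateful pass that simulates in-place deletion (pop with a shrinking-offset correction) by a two-phase plan: first build the table of zero positions, mark every second one as to-drop, then filter the array by index in one pass.
import Mathlib
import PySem

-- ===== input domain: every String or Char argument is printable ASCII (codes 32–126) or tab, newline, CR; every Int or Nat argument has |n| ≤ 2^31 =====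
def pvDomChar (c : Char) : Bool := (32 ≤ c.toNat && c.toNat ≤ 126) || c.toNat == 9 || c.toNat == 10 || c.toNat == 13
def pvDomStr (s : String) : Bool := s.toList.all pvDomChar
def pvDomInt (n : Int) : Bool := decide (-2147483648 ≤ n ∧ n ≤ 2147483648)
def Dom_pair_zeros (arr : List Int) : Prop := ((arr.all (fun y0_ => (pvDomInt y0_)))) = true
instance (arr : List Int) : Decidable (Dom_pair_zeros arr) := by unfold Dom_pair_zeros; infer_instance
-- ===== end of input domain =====

-- B replaces A's single stateful pass with in-place pops by a two-phase index-table-then-filter plan (alternative decomposition, same result).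

-- ===== PORT A =====
-- A: copy the list, scan with enumerate; the second, fourth, … zero is popped at i - offset
-- (offset counts earlier pops).  The 'none' branch of pop? is unreachable (totality guard only).
def pairZerosStep (st : List Int × Bool × Int) (p : Int × Int) : List Int × Bool × Int :=
  if p.2 == 0 && !st.2.1 then (st.1, true, st.2.2)
  else if p.2 == 0 && st.2.1 then
    match PySem.List.pop? st.1 (p.1 - st.2.2) with
    | some (_, zs) => (zs, false, st.2.2 + 1)
    | none => st
  else st

def pair_zeros (arr : List Int) : List Int :=
  ((PySem.List.enumerate arr 0).foldl pairZerosStep (arr, false, 0)).1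

-- ===== PORT B =====
-- B: table of zero positions; every second one (odd enumerate rank) goes into a drop set;
-- filter arr by index against that set.
def pair_zeros_alt (arr : List Int) : List Int :=
  let zeroIdx : List Int :=
    (PySem.List.enumerate arr 0).filterMap (fun p => if p.2 == 0 then some p.1 else none)
  let drop : PySem.Set Int :=
    PySem.Set.ofList ((PySem.List.enumerate zeroIdx 0).filterMap
      (fun p => if PySem.Int.mod p.1 2 == 1 then some p.2 else none))
  (PySem.List.enumerate arr 0).filterMap
    (fun p => if !(PySem.Set.contains drop p.1) then some p.2 else none)

-- ===== PRECONDITION & SPEC =====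
def Spec_pair_zeros (arr : List Int) (out : List Int) : Prop := out = pair_zeros_alt arr
instance (arr : List Int) (out : List Int) : Decidable (Spec_pair_zeros arr out) := by unfold Spec_pair_zeros; infer_instance

-- ===== CLAIM (what is proved, stated in full; the proofs are below) =====
def Claim_equal_pair_zeros : Prop := ∀ (arr : List Int), Dom_pair_zeros arr → Spec_pair_zeros arr (pair_zeros arr)

-- ===== LEMMAS AND PROOFS =====

-- Reference behaviour: parity-traversal.  stack = true means the next zero is dropped.
def pzSpec : List Int → Bool → List Int
  | [], _ => []
  | x :: xs, b =>
      if x = 0 then (if b then pzSpec xs false else x :: pzSpec xs true)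
      else x :: pzSpec xs b

-- elements at odd / even relative positions
mutual
  def pzOdd : List Int → List Int
    | [] => []
    | _ :: l => pzEven l
  def pzEven : List Int → List Int
    | [] => []
    | a :: l => a :: pzOdd l
end

-- zero-index table of B, with general start
def pzZi (xs : List Int) (s : Int) : List Int :=
  (PySem.List.enumerate xs s).filterMap (fun p => if p.2 == 0 then some p.1 else none)

-- index filter of B, with general start and a plain drop list
def pzF (D : List Int) (xs : List Int) (s : Int) : List Int :=
  (PySem.List.enumerate xs s).filterMap (fun p => if !(D.contains p.1) then some p.2 else none)

theorem pzZi_nil (s : Int) : pzZi [] s = [] := rfl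

theorem pzZi_cons (x : Int) (xs : List Int) (s : Int) :
    pzZi (x :: xs) s = if x = 0 then s :: pzZi xs (s + 1) else pzZi xs (s + 1) := by
  simp [pzZi, PySem.List.enumerate_cons]
  by_cases h : x = 0 <;> simp [h]

theorem pzF_nil (D : List Int) (s : Int) : pzF D [] s = [] := rfl

theorem pzF_cons (D : List Int) (x : Int) (xs : List Int) (s : Int) :
    pzF D (x :: xs) s =
      (if D.contains s then [] else [x]) ++ pzF D xs (s + 1) := by
  by_cases h : s ∈ D <;>
    simp [pzF, PySem.List.enumerate_cons, h]

theorem mem_pzZi_ge {i : Int} {xs : List Int} {s : Int} (h : i ∈ pzZi xs s) : s ≤ i := by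
  induction xs generalizing s with
  | nil => simp [pzZi_nil] at h
  | cons x xs ih =>
      rw [pzZi_cons] at h
      by_cases hx : x = 0
      · simp [hx] at h
        rcases h with h | h
        · omega
        · have := ih h; omega
      · simp [hx] at h
        have := ih h; omega

theorem mem_pz_sub (l : List Int) :
    (∀ i ∈ pzOdd l, i ∈ l) ∧ (∀ i ∈ pzEven l, i ∈ l) := by
  induction l with
  | nil => constructor <;> intro i hi <;> simp [pzOdd, pzEven] at hi
  | cons a l ih =>
      constructor
      · intro i hi
        rw [show pzOdd (a :: l) = pzEven l from rfl] at hi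
        exact List.mem_cons_of_mem a (ih.2 i hi)
      · intro i hi
        rw [show pzEven (a :: l) = a :: pzOdd l from rfl] at hi
        rcases List.mem_cons.mp hi with h | h
        · simp [h]
        · exact List.mem_cons_of_mem a (ih.1 i h)

theorem mem_pzOdd_sub {i : Int} {l : List Int} (h : i ∈ pzOdd l) : i ∈ l :=
  (mem_pz_sub l).1 i h

theorem mem_pzEven_sub {i : Int} {l : List Int} (h : i ∈ pzEven l) : i ∈ l :=
  (mem_pz_sub l).2 i h

-- dropping an index below every scanned index is invisible to pzF
theorem pzF_cons_lt (i : Int) (D : List Int) (xs : List Int) (s : Int) (h : i < s) :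
    pzF (i :: D) xs s = pzF D xs s := by
  induction xs generalizing s with
  | nil => simp [pzF_nil]
  | cons x xs ih =>
      rw [pzF_cons, pzF_cons]
      have hne : (s == i) = false := by simp; omega
      simp only [List.contains_cons, hne, Bool.false_or]
      rw [ih (s + 1) (by omega)]

-- the drop-list of a selection never contains an index below the start
theorem not_contains_of_lt {D : List Int} {s : Int}
    (hsub : ∀ i ∈ D, s < i) : D.contains s = false := by
  by_cases h : D.contains s = true
  · simp at h; have := hsub s h; omega
  · simpa using h

-- MAIN B LEMMA: filtering with the odd (resp. even) positions of the zero table is the parity traversal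
theorem pzF_sel (xs : List Int) (s : Int) (b : Bool) :
    pzF (if b then pzEven (pzZi xs s) else pzOdd (pzZi xs s)) xs s = pzSpec xs b := by
  induction xs generalizing s b with
  | nil => cases b <;> simp [pzZi_nil, pzOdd, pzEven, pzF_nil, pzSpec]
  | cons x xs ih =>
      by_cases hx : x = 0
      · subst hx
        have hz : pzZi (0 :: xs) s = s :: pzZi xs (s + 1) := by rw [pzZi_cons]; simp
        rw [hz]
        cases b with
        | false =>
            -- keep this zero; continue with pzEven of the tail table
            rw [if_neg (by simp)]
            rw [show pzOdd (s :: pzZi xs (s + 1)) = pzEven (pzZi xs (s + 1)) from rfl]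
            rw [pzF_cons]
            have hc : (pzEven (pzZi xs (s + 1))).contains s = false :=
              not_contains_of_lt (fun i hi => by
                have := mem_pzZi_ge (mem_pzEven_sub hi); omega)
            rw [hc]
            have := ih (s + 1) true
            rw [if_pos rfl] at this
            simp [this, pzSpec]
        | true =>
            -- drop this zero; the leftover head index s is invisible afterwards
            rw [if_pos rfl]
            rw [show pzEven (s :: pzZi xs (s + 1)) = s :: pzOdd (pzZi xs (s + 1)) from rfl]
            rw [pzF_cons]
            simp only [List.contains_cons, BEq.rfl, Bool.true_or]
            rw [pzF_cons_lt s _ xs (s + 1) (by omega)]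
            have := ih (s + 1) false
            rw [if_neg (by simp)] at this
            simp [this, pzSpec]
      · have hz : pzZi (x :: xs) s = pzZi xs (s + 1) := by rw [pzZi_cons]; simp [hx]
        rw [hz, pzF_cons]
        have hc : (if b then pzEven (pzZi xs (s + 1)) else pzOdd (pzZi xs (s + 1))).contains s
            = false := by
          apply not_contains_of_lt
          intro i hi
          cases b with
          | false => simp at hi; have := mem_pzZi_ge (mem_pzOdd_sub hi); omega
          | true => simp at hi; have := mem_pzZi_ge (mem_pzEven_sub hi); omega
        rw [hc]
        simp [ih (s + 1) b, pzSpec, hx]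

theorem pzFmod2 (n : Int) : n.fmod 2 = n % 2 := by
  rw [Int.fmod_eq_emod]; simp

-- the parity selection of B (enumerate + n % 2 == 1) is pzOdd / pzEven
theorem pz_parity_sel (l : List Int) (n : Int) :
    (PySem.List.enumerate l n).filterMap
        (fun p => if PySem.Int.mod p.1 2 == 1 then some p.2 else none)
      = if PySem.Int.mod n 2 == 1 then pzEven l else pzOdd l := by
  induction l generalizing n with
  | nil => cases h : (PySem.Int.mod n 2 == 1) <;> simp [PySem.List.enumerate_nil, pzOdd, pzEven]
  | cons a l ih =>
      rw [PySem.List.enumerate_cons]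
      simp only [List.filterMap_cons]
      have hflip : (PySem.Int.mod (n + 1) 2 == 1) = !(PySem.Int.mod n 2 == 1) := by
        show ((n + 1).fmod 2 == 1) = !(n.fmod 2 == 1)
        rw [pzFmod2, pzFmod2]
        rcases Int.emod_two_eq n with h | h <;> simp [Int.add_emod, h]
      cases h : (PySem.Int.mod n 2 == 1) with
      | true => rw [ih, hflip, h]; simp [pzEven]
      | false => rw [ih, hflip, h]; simp [pzOdd]

-- Set.ofList does not change membership, hence not the contains-filter either
theorem pzF_ofList (D : List Int) (xs : List Int) (s : Int) :
    (PySem.List.enumerate xs s).filterMap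
        (fun p => if !(PySem.Set.contains (PySem.Set.ofList D) p.1) then some p.2 else none)
      = pzF D xs s := by
  have hmem : ∀ i : Int, (PySem.Set.ofList D).contains i = D.contains i := by
    intro i
    simp [PySem.Set.contains, PySem.Set.mem_ofList]
  unfold pzF
  congr 1
  funext p
  rw [hmem]

theorem pair_zeros_alt_eq (arr : List Int) : pair_zeros_alt arr = pzSpec arr false := by
  unfold pair_zeros_alt
  rw [pzF_ofList, pz_parity_sel]
  rw [show (PySem.Int.mod (0 : Int) 2 == 1) = false from by decide]
  rw [if_neg (by simp)]
  have h := pzF_sel arr 0 false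
  rw [if_neg (by simp)] at h
  exact h

-- ===== A side =====

theorem pz_eraseIdx_append (out : List Int) (y : Int) (xs : List Int) :
    (out ++ y :: xs).eraseIdx out.length = out ++ xs := by
  induction out with
  | nil => simp
  | cons a out ih => simp [ih]

theorem pairZerosStep_zero_skip (zeros : List Int) (offset i : Int) :
    pairZerosStep (zeros, false, offset) (i, 0) = (zeros, true, offset) := by
  simp [pairZerosStep]

theorem pairZerosStep_zero_pop (zeros : List Int) (offset i : Int) :
    pairZerosStep (zeros, true, offset) (i, 0) =
      (match PySem.List.pop? zeros (i - offset) with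
       | some (_, zs) => (zs, false, offset + 1)
       | none => (zeros, true, offset)) := by
  simp [pairZerosStep]

theorem pairZerosStep_nonzero (zeros : List Int) (stack : Bool) (offset i d : Int)
    (h : d ≠ 0) : pairZerosStep (zeros, stack, offset) (i, d) = (zeros, stack, offset) := by
  simp [pairZerosStep, h]

theorem pzA_step (xs : List Int) (out : List Int) (stack : Bool) (offset s : Int)
    (h : (out.length : Int) = s - offset) :
    ((PySem.List.enumerate xs s).foldl pairZerosStep (out ++ xs, stack, offset)).1
      = out ++ pzSpec xs stack := by
  induction xs generalizing out stack offset s with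
  | nil => simp [PySem.List.enumerate_nil, pzSpec]
  | cons x xs ih =>
      rw [PySem.List.enumerate_cons, List.foldl_cons]
      by_cases hx : x = 0
      · subst hx
        cases stack with
        | false =>
            rw [pairZerosStep_zero_skip]
            rw [show out ++ 0 :: xs = (out ++ [0]) ++ xs from by simp]
            rw [ih (out ++ [0]) true offset (s + 1) (by simp; omega)]
            simp [pzSpec]
        | true =>
            rw [pairZerosStep_zero_pop]
            have hpop : PySem.List.pop? (out ++ 0 :: xs) (s - offset)
                = some ((out ++ 0 :: xs)[out.length]'(by simp),
                        (out ++ 0 :: xs).eraseIdx out.length) := by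
              rw [show s - offset = ((out.length : Nat) : Int) from by omega]
              exact PySem.List.pop?_natCast (out ++ 0 :: xs) out.length (by simp)
            rw [hpop]
            rw [show (match some ((out ++ 0 :: xs)[out.length]'(by simp),
                        (out ++ 0 :: xs).eraseIdx out.length) with
                 | some (_, zs) => (zs, false, offset + 1)
                 | none => (out ++ 0 :: xs, true, offset))
               = ((out ++ 0 :: xs).eraseIdx out.length, false, offset + 1) from rfl]
            rw [pz_eraseIdx_append]
            rw [ih out false (offset + 1) (s + 1) (by omega)]
            simp [pzSpec]
      · rw [pairZerosStep_nonzero _ _ _ _ _ hx]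
        rw [show out ++ x :: xs = (out ++ [x]) ++ xs from by simp]
        rw [ih (out ++ [x]) stack offset (s + 1) (by simp; omega)]
        simp [pzSpec, hx]

theorem pair_zeros_eq (arr : List Int) : pair_zeros arr = pzSpec arr false := by
  unfold pair_zeros
  have := pzA_step arr [] false 0 0 (by simp)
  simpa using this

-- ===== VERDICT (by name: the statement is the Claim_ definition above) =====
theorem pair_zeros_spec : Claim_equal_pair_zeros := by
  intro arr _
  unfold Spec_pair_zeros
  rw [pair_zeros_eq, pair_zeros_alt_eq]
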